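-- pv_equiv track=rewrite | github.com/deepaucksharma/DStudio | scripts/analyze-pages-for-agents.py | group_pages_by_priority
-- ===== SOURCE A (Python) =====
-- def group_pages_by_priority(pages_with_issues):
--     """Group pages by priority for agent assignment"""
--     groups = {
--         'critical': [],     # Core documentation pages
--         'high': [],         # Case studies and patterns
--         'medium': [],       # Examples and learning paths
--         'low': []          # Templates and misc
--     }
--
--     for page, issues in pages_with_issues.items():
--         issue_count = len(issues)
--
--         # Categorize by path and issue count
--         if 'index.md' in page and issue_count > 10:
--             groups['critical'].append((page, issue_count, issues))
--         elif 'case-studies' in page or 'patterns' in page: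
--             groups['high'].append((page, issue_count, issues))
--         elif 'google-interviews' in page or 'learning-paths' in page:
--             groups['high'].append((page, issue_count, issues))
--         elif 'examples' in page or 'templates' in page:
--             groups['medium'].append((page, issue_count, issues))
--         else:
--             groups['low'].append((page, issue_count, issues))
--
--     # Sort each group by issue count
--     for priority in groups:
--         groups[priority].sort(key=lambda x: x[1], reverse=True)
--
--     return groups
-- ===== SOURCE B (Python) =====
-- def group_pages_by_priority(pages_with_issues):
--     """Group pages by priority for agent assignment"""
--     def _priority(page, n):
--         if 'index.md' in page and n > 10:
--             return 'critical'
--         if ('case-studies' in page or 'patterns' in page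
--                 or 'google-interviews' in page or 'learning-paths' in page):
--             return 'high'
--         if 'examples' in page or 'templates' in page:
--             return 'medium'
--         return 'low'
--
--     entries = [(page, len(issues), issues) for page, issues in pages_with_issues.items()]
--     entries.sort(key=lambda e: e[1], reverse=True)  # one stable sort up front
--     return {k: [e for e in entries if _priority(e[0], e[1]) == k]
--             for k in ('critical', 'high', 'medium', 'low')}
-- ===== Notes on version B (the rewrite author's own statement) =====
-- stated objective: simpler
-- what changed: B replaces A's bucket-then-sort-each-group loop (appends into a dict of four lists, then four sorts) by one stable sort of all entries by issue count descending followed by four filter comprehensions keyed by a single priority function; stability makes each filtered group come out in A's order.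
import Mathlib
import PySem

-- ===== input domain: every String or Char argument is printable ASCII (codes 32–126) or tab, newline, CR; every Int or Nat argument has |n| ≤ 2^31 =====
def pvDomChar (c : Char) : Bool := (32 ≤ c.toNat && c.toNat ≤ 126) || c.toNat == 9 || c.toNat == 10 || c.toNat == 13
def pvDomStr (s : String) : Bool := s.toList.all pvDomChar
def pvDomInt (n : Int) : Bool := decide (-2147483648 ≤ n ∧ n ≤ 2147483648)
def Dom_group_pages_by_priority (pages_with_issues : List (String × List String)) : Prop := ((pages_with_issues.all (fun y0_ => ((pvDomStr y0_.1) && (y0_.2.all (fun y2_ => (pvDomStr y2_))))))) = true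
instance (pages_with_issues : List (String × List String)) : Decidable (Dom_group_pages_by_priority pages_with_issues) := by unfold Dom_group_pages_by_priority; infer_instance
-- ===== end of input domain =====

-- B replaces A's bucket-then-sort-each-group dict loop by one stable sort of all entries
-- (by issue count, descending) followed by four filter comprehensions (objective: simpler).

-- ===== PORT A =====
def group_pages_by_priority (pages_with_issues : List (String × List String)) : List (String × List (String × Int × List String)) :=
  let groups : PySem.Dict String (List (String × Int × List String)) :=
    ((((PySem.Dict.empty).insert "critical" []).insert "high" []).insert "medium" []).insert "low" []
  let groups := pages_with_issues.foldl (fun groups pi =>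
      let page := pi.1
      let issues := pi.2
      let issue_count : Int := PySem.List.len issues
      if PySem.Str.isIn "index.md" page ∧ issue_count > 10 then
        groups.modify "critical" [] (fun l => l ++ [(page, issue_count, issues)])
      else if PySem.Str.isIn "case-studies" page ∨ PySem.Str.isIn "patterns" page then
        groups.modify "high" [] (fun l => l ++ [(page, issue_count, issues)])
      else if PySem.Str.isIn "google-interviews" page ∨ PySem.Str.isIn "learning-paths" page then
        groups.modify "high" [] (fun l => l ++ [(page, issue_count, issues)])
      else if PySem.Str.isIn "examples" page ∨ PySem.Str.isIn "templates" page then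
        groups.modify "medium" [] (fun l => l ++ [(page, issue_count, issues)])
      else
        groups.modify "low" [] (fun l => l ++ [(page, issue_count, issues)])) groups
  let groups := groups.keys.foldl (fun groups priority =>
      groups.modify priority [] (fun l => PySem.List.sorted l (fun x => x.2.1) true)) groups
  groups.items

-- ===== PORT B =====
-- Source B's helper _priority(page, n)
def pvPriority (page : String) (n : Int) : String :=
  if PySem.Str.isIn "index.md" page ∧ n > 10 then "critical"
  else if PySem.Str.isIn "case-studies" page ∨ PySem.Str.isIn "patterns" page
       ∨ PySem.Str.isIn "google-interviews" page ∨ PySem.Str.isIn "learning-paths" page then "high"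
  else if PySem.Str.isIn "examples" page ∨ PySem.Str.isIn "templates" page then "medium"
  else "low"

def group_pages_by_priority_alt (pages_with_issues : List (String × List String)) : List (String × List (String × Int × List String)) :=
  let entries := pages_with_issues.map (fun pi => (pi.1, (PySem.List.len pi.2 : Int), pi.2))
  let entries := PySem.List.sorted entries (fun e => e.2.1) true
  ["critical", "high", "medium", "low"].map
    (fun k => (k, entries.filter (fun e => pvPriority e.1 e.2.1 == k)))

-- ===== PRECONDITION & SPEC =====
def Spec_group_pages_by_priority (pages_with_issues : List (String × List String)) (out : List (String × List (String × Int × List String))) : Prop := out = group_pages_by_priority_alt pages_with_issues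
instance (pages_with_issues : List (String × List String)) (out : List (String × List (String × Int × List String))) : Decidable (Spec_group_pages_by_priority pages_with_issues out) := by unfold Spec_group_pages_by_priority; infer_instance

-- ===== CLAIM (what is proved, stated in full; the proofs are below) =====
def Claim_equal_group_pages_by_priority : Prop := ∀ (pages_with_issues : List (String × List String)), Dom_group_pages_by_priority pages_with_issues → Spec_group_pages_by_priority pages_with_issues (group_pages_by_priority pages_with_issues)

-- ===== LEMMAS AND PROOFS =====

-- insertBy puts x in front when x should come before every element
theorem pv_insertBy_of_forall_before {α : Type} (before : α → α → Bool) (x : α) (ys : List α)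
    (h : ∀ y ∈ ys, before x y = true) :
    PySem.List.insertBy before x ys = x :: ys := by
  cases ys with
  | nil => rfl
  | cons y ys => simp [PySem.List.insertBy, h y (by simp)]

-- filtering commutes with stable insertion into a descending-sorted list
theorem pv_filter_insertBy {α κ : Type} [LinearOrder κ] (key : α → κ) (P : α → Bool) (x : α)
    (ys : List α) (h : ys.Pairwise (fun a b => key b ≤ key a)) :
    (PySem.List.insertBy (fun a b => decide (key b < key a)) x ys).filter P
      = if P x then PySem.List.insertBy (fun a b => decide (key b < key a)) x (ys.filter P)
        else ys.filter P := by
  induction ys with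
  | nil => cases hPx : P x <;> simp [PySem.List.insertBy, hPx]
  | cons y ys ih =>
    rcases List.pairwise_cons.mp h with ⟨hy, htl⟩
    by_cases hlt : key y < key x
    · have hfront : ∀ z ∈ (y :: ys).filter P, (fun a b => decide (key b < key a)) x z = true := by
        intro z hz
        have hz' := List.mem_of_mem_filter hz
        rcases List.mem_cons.mp hz' with rfl | hz2
        · simpa using hlt
        · exact decide_eq_true (lt_of_le_of_lt (hy z hz2) hlt)
      rw [show PySem.List.insertBy (fun a b => decide (key b < key a)) x (y :: ys)
            = x :: y :: ys by simp [PySem.List.insertBy, hlt]]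
      cases hPx : P x
      · simp [List.filter, hPx]
      · rw [pv_insertBy_of_forall_before _ _ _ hfront]
        simp [List.filter, hPx]
    · rw [show PySem.List.insertBy (fun a b => decide (key b < key a)) x (y :: ys)
            = y :: PySem.List.insertBy (fun a b => decide (key b < key a)) x ys by
          simp [PySem.List.insertBy, hlt]]
      cases hPy : P y <;> cases hPx : P x <;>
        simp [List.filter, hPy, hPx, ih htl, PySem.List.insertBy, hlt]

-- filtering commutes with Python's stable reverse sort
theorem pv_filter_sorted_rev {α κ : Type} [LinearOrder κ] (key : α → κ) (P : α → Bool)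
    (xs : List α) :
    PySem.List.sorted (xs.filter P) key true = (PySem.List.sorted xs key true).filter P := by
  induction xs using List.reverseRecOn with
  | nil => rfl
  | append_singleton xs x ih =>
    have hins : ∀ (l : List α),
        PySem.List.sorted (l ++ [x]) key true
          = PySem.List.insertBy (fun a b => decide (key b < key a)) x
              (PySem.List.sorted l key true) := by
      intro l
      rw [PySem.List.sorted_rev_eq_foldl_insertBy, PySem.List.sorted_rev_eq_foldl_insertBy,
        List.foldl_append]
      rfl
    rw [List.filter_append, hins xs,
      pv_filter_insertBy key P x _ (PySem.List.sorted_pairwise_rev xs key)]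
    cases hPx : P x
    · rw [if_neg (by simp), show List.filter P [x] = [] by simp [List.filter, hPx],
        List.append_nil, ih]
    · rw [if_pos (by simp), show List.filter P [x] = [x] by simp [List.filter, hPx],
        hins (xs.filter P), ih]

-- merging A's two adjacent elif-branches with equal result
theorem pv_ite_merge {B : Type} (x y z w : B) (c1 c2 c3 c4 c5 c6 : Prop)
    [Decidable c1] [Decidable c2] [Decidable c3] [Decidable c4] [Decidable c5] [Decidable c6] :
    (if c1 then x else if c2 ∨ c3 then y else if c4 ∨ c5 then y else if c6 then z else w)
      = (if c1 then x else if c2 ∨ c3 ∨ c4 ∨ c5 then y else if c6 then z else w) := by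
  split_ifs <;> first | rfl | tauto

-- the if/elif chain of A's loop body is a modify at the pvPriority key
theorem pv_bodyA (g : PySem.Dict String (List (String × Int × List String)))
    (pi : String × List String) :
    (let page := pi.1
     let issues := pi.2
     let issue_count : Int := PySem.List.len issues
     if PySem.Str.isIn "index.md" page ∧ issue_count > 10 then
       g.modify "critical" [] (fun l => l ++ [(page, issue_count, issues)])
     else if PySem.Str.isIn "case-studies" page ∨ PySem.Str.isIn "patterns" page then
       g.modify "high" [] (fun l => l ++ [(page, issue_count, issues)])
     else if PySem.Str.isIn "google-interviews" page ∨ PySem.Str.isIn "learning-paths" page then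
       g.modify "high" [] (fun l => l ++ [(page, issue_count, issues)])
     else if PySem.Str.isIn "examples" page ∨ PySem.Str.isIn "templates" page then
       g.modify "medium" [] (fun l => l ++ [(page, issue_count, issues)])
     else
       g.modify "low" [] (fun l => l ++ [(page, issue_count, issues)]))
    = g.modify (pvPriority pi.1 (PySem.List.len pi.2)) []
        (fun l => l ++ [(pi.1, PySem.List.len pi.2, pi.2)]) := by
  unfold pvPriority
  simp only [apply_ite (fun k => PySem.Dict.modify g k ([] : List (String × Int × List String))
    (fun l => l ++ [(pi.1, PySem.List.len pi.2, pi.2)]))]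
  exact pv_ite_merge _ _ _ _ _ _ _ _ _ _

theorem pv_priority_mem (page : String) (n : Int) :
    pvPriority page n ∈ (["critical", "high", "medium", "low"] : List String) := by
  unfold pvPriority; split_ifs <;> simp

-- getD of an append-to-group loop keyed by `key`
theorem pv_getD_foldl_modify_key_append {κ α ν : Type} [BEq κ] [LawfulBEq κ] [DecidableEq κ]
    (l : List α) (key : α → κ) (v : α → ν) (d : PySem.Dict κ (List ν)) (c : κ) :
    (l.foldl (fun d p => d.modify (key p) [] (fun ys => ys ++ [v p])) d).getD c []
      = d.getD c [] ++ (l.filter (fun p => key p == c)).map v := by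
  induction l generalizing d with
  | nil => simp
  | cons a l ih =>
    rw [List.foldl_cons, ih, PySem.Dict.getD_modify]
    by_cases hc : key a = c
    · simp [hc, List.filter]
    · simp [Ne.symm hc, List.filter, beq_eq_false_iff_ne.mpr hc]

-- getD of the sort-each-key loop over a Nodup key list
theorem pv_getD_foldl_modify_keys {κ ν : Type} [BEq κ] [LawfulBEq κ] [DecidableEq κ]
    (ks : List κ) (hnd : ks.Nodup) (g : PySem.Dict κ ν) (c : κ) (d0 : ν) (f : ν → ν) :
    (ks.foldl (fun g k => g.modify k d0 f) g).getD c d0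
      = if c ∈ ks then f (g.getD c d0) else g.getD c d0 := by
  induction ks generalizing g with
  | nil => simp
  | cons k ks ih =>
    rcases List.nodup_cons.mp hnd with ⟨hk, hnd'⟩
    rw [List.foldl_cons, ih hnd', PySem.Dict.getD_modify]
    by_cases hc : c ∈ ks
    · have : c ≠ k := fun h => hk (h ▸ hc)
      simp [hc, this]
    · by_cases hck : c = k <;> simp [hc, hck, hk]

-- Set.update is the identity when every added element is already present
theorem pv_set_update_of_mem {α : Type} [BEq α] [LawfulBEq α] (s : PySem.Set α) (l : List α)
    (h : ∀ x ∈ l, x ∈ s) : PySem.Set.update s l = s := by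
  induction l generalizing s with
  | nil => rfl
  | cons a l ih =>
    have h1 : s.add a = s := PySem.Set.add_of_mem (h a (by simp))
    show PySem.Set.update (s.add a) l = s
    rw [h1]
    exact ih s (fun x hx => h x (List.mem_cons_of_mem _ hx))

-- the sort-each-key loop does not change the key list when it only touches existing keys
theorem pv_keys_foldl_modify_sub {κ ν : Type} [BEq κ] [LawfulBEq κ] (ks : List κ) (d0 : ν)
    (f : ν → ν) : ∀ (g : PySem.Dict κ ν), (∀ k ∈ ks, k ∈ g.keys) →
    (ks.foldl (fun g k => g.modify k d0 f) g).keys = g.keys := by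
  induction ks with
  | nil => intro g _; rfl
  | cons k ks ih =>
    intro g h
    have hc : g.contains k = true := (PySem.Dict.contains_iff_mem_keys g k).mpr (h k (by simp))
    have hkeys : (g.modify k d0 f).keys = g.keys := by
      rw [PySem.Dict.keys_modify, PySem.Dict.keys_insert_of_contains g _ hc]
    rw [List.foldl_cons,
      ih _ (fun x hx => by rw [hkeys]; exact h x (List.mem_cons_of_mem _ hx)), hkeys]

-- A returns, for each of the four keys in order, the reverse-sorted filtered entries
theorem pv_A_char (pages : List (String × List String)) :
    group_pages_by_priority pages
      = ["critical", "high", "medium", "low"].map (fun k =>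
          (k, PySem.List.sorted
                ((pages.filter (fun p => pvPriority p.1 (PySem.List.len p.2) == k)).map
                  (fun p => (p.1, PySem.List.len p.2, p.2)))
                (fun x => x.2.1) true)) := by
  simp only [group_pages_by_priority]
  rw [List.foldl_ext _
    (fun g (p : String × List String) => PySem.Dict.modify g (pvPriority p.1 (PySem.List.len p.2))
      [] (fun l => l ++ [(p.1, PySem.List.len p.2, p.2)])) _ (fun g p _ => pv_bodyA g p)]
  set init : PySem.Dict String (List (String × Int × List String)) :=
    ((((PySem.Dict.empty).insert "critical" []).insert "high" []).insert "medium" []).insert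
      "low" [] with hinit
  set d1 := pages.foldl (fun g (p : String × List String) =>
    PySem.Dict.modify g (pvPriority p.1 (PySem.List.len p.2)) []
      (fun l => l ++ [(p.1, PySem.List.len p.2, p.2)])) init with hd1
  have hk1 : d1.keys = ["critical", "high", "medium", "low"] := by
    rw [hd1, PySem.Dict.keys_foldl_modify_key pages
      (fun p => pvPriority p.1 (PySem.List.len p.2)) []
      (fun _ p => fun l => l ++ [(p.1, PySem.List.len p.2, p.2)]) init]
    have hik : init.keys = ["critical", "high", "medium", "low"] := by rw [hinit]; decide
    rw [hik]
    exact pv_set_update_of_mem _ _ (fun x hx => by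
      obtain ⟨p, _, rfl⟩ := List.mem_map.mp hx
      exact pv_priority_mem p.1 (PySem.List.len p.2))
  set d2 := d1.keys.foldl (fun g k =>
    PySem.Dict.modify g k [] (fun l => PySem.List.sorted l (fun x => x.2.1) true)) d1 with hd2
  have hk2 : d2.keys = d1.keys := by
    rw [hd2]
    exact pv_keys_foldl_modify_sub d1.keys [] _ d1 (fun _ hk => hk)
  rw [PySem.Dict.items_eq_map_keys d2 (by rw [hk2, hk1]; decide) [], hk2, hk1]
  refine List.map_congr_left (fun k hk => ?_)
  have hgd2 : d2.getD k [] = PySem.List.sorted (d1.getD k []) (fun x => x.2.1) true := by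
    rw [hd2, hk1, pv_getD_foldl_modify_keys _ (by decide) d1 k [] _, if_pos hk]
  have hgd1 : d1.getD k []
      = (pages.filter (fun p => pvPriority p.1 (PySem.List.len p.2) == k)).map
          (fun p => (p.1, PySem.List.len p.2, p.2)) := by
    rw [hd1, pv_getD_foldl_modify_key_append pages
      (fun p => pvPriority p.1 (PySem.List.len p.2))
      (fun p => (p.1, PySem.List.len p.2, p.2)) init k]
    have hie : init.getD k [] = [] := by
      fin_cases hk <;> (rw [hinit]; decide)
    rw [hie, List.nil_append]
  rw [hgd2, hgd1]

-- B returns the same four filtered groups: one stable reverse sort, then four filters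
theorem pv_B_char (pages : List (String × List String)) :
    group_pages_by_priority_alt pages
      = ["critical", "high", "medium", "low"].map (fun k =>
          (k, PySem.List.sorted
                ((pages.filter (fun p => pvPriority p.1 (PySem.List.len p.2) == k)).map
                  (fun p => (p.1, PySem.List.len p.2, p.2)))
                (fun x => x.2.1) true)) := by
  simp only [group_pages_by_priority_alt]
  refine List.map_congr_left (fun k _ => ?_)
  refine congrArg (fun l => (k, l)) ?_
  rw [← pv_filter_sorted_rev (fun x => x.2.1) (fun e => pvPriority e.1 e.2.1 == k)
    (pages.map (fun pi => (pi.1, PySem.List.len pi.2, pi.2))), List.filter_map]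
  rfl

-- ===== VERDICT (by name: the statement is the Claim_ definition above) =====
theorem group_pages_by_priority_spec : Claim_equal_group_pages_by_priority := by
  intro pages _
  unfold Spec_group_pages_by_priority
  rw [pv_A_char, pv_B_char]
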